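-- pv_equiv track=rewrite | github.com/OTOYO1020/ChatDev_Intermediate | WareHouse/FD_265__20250518062605/lattice_functions.py | generate_lattice_points
-- ===== SOURCE A (Python) =====
-- from itertools import product
--
-- def is_lattice_point(point):
--     '''Checks if a given point is a lattice point (all components are integers).'''
--     return all(isinstance(coord, int) for coord in point)
--
-- def generate_lattice_points(p, q, D):
--     '''Generates all possible lattice points within the bounding box defined by p and q.'''
--     # Calculate the bounding box
--     min_point = [min(p[i], q[i]) - D for i in range(len(p))]
--     max_point = [max(p[i], q[i]) + D for i in range(len(p))]
--     # Generate all possible lattice points within the bounding box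
--     lattice_points = []
--     for coords in product(*(range(min_point[i], max_point[i] + 1) for i in range(len(p)))):
--         if is_lattice_point(coords):
--             lattice_points.append(coords)
--     return lattice_points
-- ===== SOURCE B (Python) =====
-- def generate_lattice_points(p, q, D):
--     '''Generates all possible lattice points within the bounding box defined by p and q.'''
--     # Mixed-radix rank decoding: count the points, then decode each rank 0..total-1
--     # into its coordinate tuple by successive divmod (rightmost dimension least significant).
--     los, sizes, total = [], [], 1
--     for a, b in zip(p, q):
--         lo = min(a, b) - D
--         size = max(0, (max(a, b) + D) - lo + 1)
--         los.append(lo)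
--         sizes.append(size)
--         total *= size
--     out = []
--     for k in range(total):
--         coords = []
--         r = k
--         for lo, s in reversed(list(zip(los, sizes))):
--             r, d = divmod(r, s)
--             coords = [lo + d] + coords
--         out.append(tuple(coords))
--     return out
-- ===== Notes on version B (the rewrite author's own statement) =====
-- stated objective: alternative
-- what changed: Replaces itertools.product enumeration (plus the vacuous is_lattice_point filter) by mixed-radix rank decoding: B counts the lattice points as the product of per-dimension range sizes and decodes each rank 0..total-1 into its coordinate tuple by successive divmod, yielding the same lexicographic order.
import Mathlib
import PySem

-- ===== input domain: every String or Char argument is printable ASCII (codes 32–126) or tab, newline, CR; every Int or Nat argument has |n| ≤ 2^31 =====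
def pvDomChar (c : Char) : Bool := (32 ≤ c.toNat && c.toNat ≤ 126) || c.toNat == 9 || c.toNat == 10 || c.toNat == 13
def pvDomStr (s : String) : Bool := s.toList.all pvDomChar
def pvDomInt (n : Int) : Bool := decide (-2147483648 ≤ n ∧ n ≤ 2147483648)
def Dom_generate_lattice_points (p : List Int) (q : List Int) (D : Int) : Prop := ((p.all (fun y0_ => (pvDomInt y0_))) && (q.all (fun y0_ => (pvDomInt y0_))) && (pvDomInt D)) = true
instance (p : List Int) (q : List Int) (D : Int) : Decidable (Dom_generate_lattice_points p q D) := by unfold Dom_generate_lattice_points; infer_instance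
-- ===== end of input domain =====

-- B replaces A's Cartesian-product enumeration by mixed-radix rank decoding: it counts
-- the points (product of per-dimension range sizes) and decodes each rank 0..total-1
-- into its coordinates by successive divmod (alternative algorithm, same output order).


-- ===== PORT A =====
-- is_lattice_point: all components are Python ints; on List Int this is vacuously true per coord
def pv_is_lattice_point (point : List Int) : Bool := point.all (fun _ => true)

-- itertools.product of a list of (already materialised) iterables, lexicographic, rightmost fastest
def pv_product : List (List Int) → List (List Int)
  | [] => [[]]
  | r :: rs => r.flatMap (fun x => (pv_product rs).map (fun t => x :: t))

def generate_lattice_points (p : List Int) (q : List Int) (D : Int) : List (List Int) :=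
  let min_point := (List.range p.length).map (fun i => min (p.getD i 0) (q.getD i 0) - D)
  let max_point := (List.range p.length).map (fun i => max (p.getD i 0) (q.getD i 0) + D)
  let gens := (List.range p.length).map (fun i =>
    PySem.List.pyRange (min_point.getD i 0) (max_point.getD i 0 + 1) 1)
  (pv_product gens).filter pv_is_lattice_point

-- ===== PORT B =====
-- divmod(r, s) is ported as (floordiv r s, mod r s): every executed iteration has s > 0
-- (a zero size forces total = 0, so the outer range is empty), so Python never raises there.
def generate_lattice_points_alt (p : List Int) (q : List Int) (D : Int) : List (List Int) :=
  let st := (p.zip q).foldl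
    (fun (st : List Int × List Int × Int) ab =>
      let lo := min ab.1 ab.2 - D
      let size := max 0 ((max ab.1 ab.2 + D) - lo + 1)
      (st.1 ++ [lo], st.2.1 ++ [size], st.2.2 * size)) ([], [], 1)
  (PySem.List.pyRange 0 st.2.2 1).map (fun k =>
    ((st.1.zip st.2.1).reverse.foldl
      (fun (rc : Int × List Int) ls =>
        (PySem.Int.floordiv rc.1 ls.2, (ls.1 + PySem.Int.mod rc.1 ls.2) :: rc.2))
      (k, [])).2)

-- ===== PRECONDITION & SPEC =====
-- Python A raises IndexError on q[i] when q is shorter than p; excluded (B's zip would truncate instead).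
def Pre_generate_lattice_points (p : List Int) (q : List Int) (D : Int) : Prop :=
  p.length ≤ q.length
instance (p : List Int) (q : List Int) (D : Int) : Decidable (Pre_generate_lattice_points p q D) := by unfold Pre_generate_lattice_points; infer_instance
def pvWitness_generate_lattice_points : List Int × List Int × Int := ([0], [1], 1)
def Spec_generate_lattice_points (p : List Int) (q : List Int) (D : Int) (out : List (List Int)) : Prop := out = generate_lattice_points_alt p q D
instance (p : List Int) (q : List Int) (D : Int) (out : List (List Int)) : Decidable (Spec_generate_lattice_points p q D out) := by unfold Spec_generate_lattice_points; infer_instance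

-- ===== CLAIM (what is proved, stated in full; the proofs are below) =====
def Claim_equal_generate_lattice_points : Prop := ∀ (p : List Int) (q : List Int) (D : Int), Dom_generate_lattice_points p q D → Pre_generate_lattice_points p q D → Spec_generate_lattice_points p q D (generate_lattice_points p q D)


-- ===== LEMMAS AND PROOFS =====

-- the (lo, size) pair of one dimension
def pvPair (D : Int) (ab : Int × Int) : Int × Int :=
  (min ab.1 ab.2 - D, max 0 ((max ab.1 ab.2 + D) - (min ab.1 ab.2 - D) + 1))

-- total point count of a pair list
def pvT (pairs : List (Int × Int)) : Int := (pairs.map Prod.snd).prod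

-- the divmod decoding chain, foldr form (= B's foldl over the reversed list)
def pvChain (pairs : List (Int × Int)) (k : Int) : Int × List Int :=
  pairs.foldr (fun ls rc => (PySem.Int.floordiv rc.1 ls.2, (ls.1 + PySem.Int.mod rc.1 ls.2) :: rc.2)) (k, [])

theorem pvT_cons (ls : Int × Int) (rest : List (Int × Int)) : pvT (ls :: rest) = ls.2 * pvT rest := by
  simp [pvT]

theorem pvT_pos (pairs : List (Int × Int)) (h : ∀ ls ∈ pairs, 0 < ls.2) : 0 < pvT pairs := by
  refine List.prod_pos ?_
  intro a ha
  obtain ⟨ls, hls, rfl⟩ := List.mem_map.mp ha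
  exact h ls hls

-- the quotient/shift law of the divmod chain
theorem pvChain_shift (pairs : List (Int × Int)) (hpos : ∀ ls ∈ pairs, 0 < ls.2) :
    ∀ a j : Int, 0 ≤ j → j < pvT pairs →
      pvChain pairs (a * pvT pairs + j) = (a, (pvChain pairs j).2) := by
  induction pairs with
  | nil =>
      intro a j h0 h1
      have : j = 0 := by simp [pvT] at h1 ⊢; omega
      subst this
      simp [pvChain, pvT]
  | cons ls rest ih =>
      intro a j h0 h1
      have hs : 0 < ls.2 := hpos ls (by simp)
      have hrest : ∀ x ∈ rest, 0 < x.2 := fun x hx => hpos x (by simp [hx])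
      have hT' : 0 < pvT rest := pvT_pos rest hrest
      rw [pvT_cons] at h1
      set T' := pvT rest with hT'def
      set d := j / T' with hd
      set j' := j % T' with hj'
      have hdecomp : j = d * T' + j' := by
        rw [hd, hj', mul_comm]; exact (Int.mul_ediv_add_emod j T').symm
      have hj'0 : 0 ≤ j' := Int.emod_nonneg j (by omega)
      have hj'1 : j' < T' := Int.emod_lt_of_pos j hT'
      have hd0 : 0 ≤ d := Int.ediv_nonneg h0 (le_of_lt hT')
      have hd1 : d < ls.2 := (Int.ediv_lt_iff_lt_mul hT').mpr h1
      have hk : a * pvT (ls :: rest) + j = (a * ls.2 + d) * T' + j' := by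
        rw [pvT_cons, hT'def, hdecomp]; ring
      have hq : ∀ b : Int, PySem.Int.floordiv (b * ls.2 + d) ls.2 = b := by
        intro b
        rw [PySem.Int.floordiv_eq_ediv_of_pos hs, add_comm, Int.add_mul_ediv_right d b (by omega),
            Int.ediv_eq_zero_of_lt hd0 hd1, zero_add]
      have hm : ∀ b : Int, PySem.Int.mod (b * ls.2 + d) ls.2 = d := by
        intro b
        rw [PySem.Int.mod_eq_emod_of_pos hs, add_comm, Int.add_mul_emod_self_right,
            Int.emod_eq_of_lt hd0 hd1]
      have step : ∀ k : Int, pvChain (ls :: rest) k =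
          (PySem.Int.floordiv (pvChain rest k).1 ls.2,
           (ls.1 + PySem.Int.mod (pvChain rest k).1 ls.2) :: (pvChain rest k).2) := by
        intro k; simp [pvChain]
      rw [step, step, hk, ih hrest (a * ls.2 + d) j' hj'0 hj'1]
      have hj2 : j = (0 * ls.2 + d) * T' + j' := by rw [hdecomp]; ring
      rw [hj2, ih hrest (0 * ls.2 + d) j' hj'0 hj'1]
      have hm0 : PySem.Int.mod d ls.2 = d := by
        rw [PySem.Int.mod_eq_emod_of_pos hs, Int.emod_eq_of_lt hd0 hd1]
      simp [hq, hm, hm0]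

-- rank decomposition of a product-sized range
theorem pv_range_mul (S N : Nat) :
    List.range (S * N) = (List.range S).flatMap (fun d => (List.range N).map (fun j => d * N + j)) := by
  induction S with
  | zero => simp
  | succ S ih =>
      rw [Nat.succ_mul, List.range_add, ih, List.range_succ]
      simp

-- itertools.product is empty as soon as one factor is empty
theorem pv_product_nil_mem (rs : List (List Int)) (h : [] ∈ rs) : pv_product rs = [] := by
  induction rs with
  | nil => simp at h
  | cons r rs ih =>
      rcases List.mem_cons.mp h with h | h
      · simp [pv_product, ← h]
      · simp [pv_product, ih h]

-- core: the product of the ranges equals rank decoding of range(total)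
theorem pv_core (pairs : List (Int × Int)) (hge : ∀ ls ∈ pairs, 0 ≤ ls.2) :
    pv_product (pairs.map (fun ls => PySem.List.pyRange ls.1 (ls.1 + ls.2) 1))
      = (PySem.List.pyRange 0 (pvT pairs) 1).map (fun k => (pvChain pairs k).2) := by
  by_cases hall : ∀ ls ∈ pairs, 0 < ls.2
  · clear hge
    induction pairs with
    | nil => simp [pv_product, pvT, pvChain, PySem.List.pyRange_one]
    | cons ls rest ih =>
        have hs : 0 < ls.2 := hall ls (by simp)
        have hrest : ∀ x ∈ rest, 0 < x.2 := fun x hx => hall x (by simp [hx])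
        have hT' : 0 < pvT rest := pvT_pos rest hrest
        set S := ls.2.toNat with hS
        set N := (pvT rest).toNat with hN
        have hsS : ls.2 = (S : Int) := by omega
        have hTN : pvT rest = (N : Int) := by omega
        have hmulT : pvT (ls :: rest) = ((S * N : Nat) : Int) := by
          rw [pvT_cons, hsS, hTN]; push_cast; ring
        have step : ∀ k : Int, (pvChain (ls :: rest) k).2 =
            (ls.1 + PySem.Int.mod (pvChain rest k).1 ls.2) :: (pvChain rest k).2 := by
          intro k; simp [pvChain]
        simp only [List.map_cons, pv_product, ih hrest]
        rw [PySem.List.pyRange_one ls.1 (ls.1 + ls.2), PySem.List.pyRange_one 0 (pvT (ls :: rest)),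
            PySem.List.pyRange_one 0 (pvT rest)]
        have h1 : (ls.1 + ls.2 - ls.1).toNat = S := by omega
        have h2 : (pvT (ls :: rest) - 0).toNat = S * N := by omega
        have h3 : (pvT rest - 0).toNat = N := by omega
        rw [h1, h2, h3, pv_range_mul]
        simp only [List.flatMap_map, List.map_flatMap, List.map_map, Function.comp_def]
        apply List.flatMap_congr
        intro d hd
        apply List.map_congr_left
        intro j hj
        have hdS : (d : Int) < ls.2 := by rw [hsS]; exact_mod_cast List.mem_range.mp hd
        have hjN : (j : Int) < pvT rest := by rw [hTN]; exact_mod_cast List.mem_range.mp hj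
        have hk : (0 : Int) + ((d * N + j : Nat) : Int) = (d : Int) * pvT rest + (j : Int) := by
          rw [hTN]; push_cast; ring
        rw [hk, step, pvChain_shift rest hrest (d : Int) (j : Int) (Int.natCast_nonneg j) hjN]
        have hmd : PySem.Int.mod (d : Int) ls.2 = (d : Int) := by
          rw [PySem.Int.mod_eq_emod_of_pos hs, Int.emod_eq_of_lt (Int.natCast_nonneg d) hdS]
        rw [hmd]
        simp
  · push Not at hall
    obtain ⟨ls, hls, hle⟩ := hall
    have hz : ls.2 = 0 := le_antisymm hle (hge ls hls)
    have hzero : pvT pairs = 0 := by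
      refine List.prod_eq_zero ?_
      rw [← hz]
      exact List.mem_map.mpr ⟨ls, hls, rfl⟩
    rw [hzero]
    have hempty : PySem.List.pyRange ls.1 (ls.1 + ls.2) 1 = [] := by
      rw [PySem.List.pyRange_one, hz]
      simp
    rw [pv_product_nil_mem _ (List.mem_map.mpr ⟨ls, hls, hempty⟩)]
    simp

-- clamped vs raw upper bound of one range
theorem pv_range_clamp (lo hi : Int) :
    PySem.List.pyRange lo (hi + 1) 1 = PySem.List.pyRange lo (lo + max 0 (hi - lo + 1)) 1 := by
  rw [PySem.List.pyRange_one, PySem.List.pyRange_one]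
  have h : (hi + 1 - lo).toNat = (lo + max 0 (hi - lo + 1) - lo).toNat := by omega
  rw [h]

-- ===== VERDICT (by name: the statement is the Claim_ definition above) =====
theorem generate_lattice_points_spec : Claim_equal_generate_lattice_points := by
  intro p q D _ hpre
  unfold Pre_generate_lattice_points at hpre
  unfold Spec_generate_lattice_points generate_lattice_points generate_lattice_points_alt
  -- B side: the accumulator fold builds exactly (los, sizes, total) of the pair list
  have hbuild : ∀ (l : List (Int × Int)) (los sizes : List Int) (t : Int),
      l.foldl (fun (st : List Int × List Int × Int) ab =>
        let lo := min ab.1 ab.2 - D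
        let size := max 0 ((max ab.1 ab.2 + D) - lo + 1)
        (st.1 ++ [lo], st.2.1 ++ [size], st.2.2 * size)) (los, sizes, t)
      = (los ++ (l.map (pvPair D)).map Prod.fst,
         sizes ++ (l.map (pvPair D)).map Prod.snd,
         t * pvT (l.map (pvPair D))) := by
    intro l
    induction l with
    | nil => intro los sizes t; simp [pvT]
    | cons ab l ih =>
        intro los sizes t
        simp only [List.foldl_cons, ih, List.map_cons, pvT_cons]
        simp [pvPair, mul_assoc]
  rw [hbuild]
  set pairs := (p.zip q).map (pvPair D) with hpairs
  simp only [List.nil_append, one_mul]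
  have hzip : ((pairs.map Prod.fst).zip (pairs.map Prod.snd)) = pairs := by
    rw [List.zip_map']
    simp
  rw [hzip]
  have hchain : ∀ k : Int,
      (pairs.reverse.foldl
        (fun (rc : Int × List Int) ls =>
          (PySem.Int.floordiv rc.1 ls.2, (ls.1 + PySem.Int.mod rc.1 ls.2) :: rc.2)) (k, []))
      = pvChain pairs k := by
    intro k
    rw [List.foldl_reverse]
    rfl
  -- A side: the filter is vacuous
  have hfilter : ∀ l : List (List Int), l.filter pv_is_lattice_point = l := by
    intro l; simp [pv_is_lattice_point, List.filter_eq_self]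
  rw [hfilter]
  -- A side: the generators are the ranges of the pair list
  have hlen : (p.zip q).length = p.length := by
    rw [List.length_zip]; omega
  have hgens : (List.range p.length).map (fun i =>
        PySem.List.pyRange
          (((List.range p.length).map (fun i => min (p.getD i 0) (q.getD i 0) - D)).getD i 0)
          ((((List.range p.length).map (fun i => max (p.getD i 0) (q.getD i 0) + D)).getD i 0) + 1) 1)
      = pairs.map (fun ls => PySem.List.pyRange ls.1 (ls.1 + ls.2) 1) := by
    apply List.ext_getElem
    · simp [hpairs, hlen]
    · intro i h1 h2
      have hip : i < p.length := by simpa using h1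
      have hiq : i < q.length := by omega
      have hgetD : ∀ (f : Nat → Int), (((List.range p.length).map f).getD i 0) = f i := by
        intro f; simp [List.getD, hip]
      simp only [List.getElem_map, List.getElem_range, hgetD, hpairs, List.getElem_zip]
      have hp : p.getD i 0 = p[i] := by simp [List.getD, List.getElem?_eq_getElem hip]
      have hq : q.getD i 0 = q[i] := by simp [List.getD, List.getElem?_eq_getElem hiq]
      rw [hp, hq, pv_range_clamp]
      simp [pvPair]
  rw [hgens, pv_core pairs (by intro ls hls; rcases List.mem_map.mp hls with ⟨ab, _, rfl⟩; simp [pvPair])]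
  simp only [hchain]
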